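-- pv_equiv track=rewrite | github.com/pypi-data/pypi-mirror-280 | packages/pyhydroportail/pyhydroportail-0.0.2rc0.tar.gz/pyhydroportail-0.0.2rc0/pyhydroportail/commands/arguments.py | get_unparsable_arguments
-- ===== SOURCE A (Python) =====
-- import itertools
--
-- def get_unparsable_arguments(remaining_action_arguments):
--     """
--     Given a sequence of argument tuples (one per action parser that parsed arguments), determine the
--     remaining arguments that no action parsers have consumed.
--     """
--     if not remaining_action_arguments:
--         return ()
--
--     return tuple(
--         argument
--         for argument in dict.fromkeys(itertools.chain.from_iterable(remaining_action_arguments)).keys()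
--         if all(argument in action_arguments for action_arguments in remaining_action_arguments)
--     )
-- ===== SOURCE B (Python) =====
-- def get_unparsable_arguments(remaining_action_arguments):
--     """
--     Given a sequence of argument tuples (one per action parser that parsed arguments), determine the
--     remaining arguments that no action parsers have consumed.
--     """
--     if not remaining_action_arguments:
--         return ()
--     first = remaining_action_arguments[0]
--     common = set(first)
--     for action_arguments in remaining_action_arguments[1:]:
--         common &= set(action_arguments)
--     return tuple(a for a in dict.fromkeys(first) if a in common)
-- ===== Notes on version B (the rewrite author's own statement) =====
-- stated objective: faster
-- what changed: Instead of deduping the concatenation of all tuples and re-scanning every tuple linearly for every candidate with all(), B builds the set intersection of all tuples once and then scans only the first tuple in order, keeping its deduped elements that are in the intersection.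
import Mathlib
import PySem

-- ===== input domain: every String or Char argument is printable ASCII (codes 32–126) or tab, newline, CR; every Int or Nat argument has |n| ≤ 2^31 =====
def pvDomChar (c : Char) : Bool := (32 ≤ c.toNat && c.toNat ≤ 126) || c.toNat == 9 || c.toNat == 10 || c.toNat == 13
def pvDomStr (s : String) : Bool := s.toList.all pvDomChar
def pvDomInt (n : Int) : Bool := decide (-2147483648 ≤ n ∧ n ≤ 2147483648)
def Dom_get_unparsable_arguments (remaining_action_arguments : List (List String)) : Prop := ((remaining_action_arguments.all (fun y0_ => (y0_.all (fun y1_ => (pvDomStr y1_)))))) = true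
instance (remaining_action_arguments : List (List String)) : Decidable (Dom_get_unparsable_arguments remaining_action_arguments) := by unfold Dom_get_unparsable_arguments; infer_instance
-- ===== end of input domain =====

-- B builds the intersection of all tuples once and scans only the first tuple; same result, different traversal.

-- ===== PORT A =====
def get_unparsable_arguments (remaining_action_arguments : List (List String)) : List String :=
  if remaining_action_arguments = [] then []
  else (PySem.List.dedup remaining_action_arguments.flatten).filter
        (fun a => remaining_action_arguments.all (fun t => t.contains a))

-- ===== PORT B =====
def get_unparsable_arguments_alt (remaining_action_arguments : List (List String)) : List String :=
  match remaining_action_arguments with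
  | [] => []
  | first :: rest =>
    let common := rest.foldl (fun c t => PySem.Set.inter c (PySem.Set.ofList t)) (PySem.Set.ofList first)
    (PySem.List.dedup first).filter (fun a => PySem.Set.contains common a)

-- ===== PRECONDITION & SPEC =====
def Spec_get_unparsable_arguments (remaining_action_arguments : List (List String)) (out : List String) : Prop := out = get_unparsable_arguments_alt remaining_action_arguments
instance (remaining_action_arguments : List (List String)) (out : List String) : Decidable (Spec_get_unparsable_arguments remaining_action_arguments out) := by unfold Spec_get_unparsable_arguments; infer_instance

-- ===== CLAIM (what is proved, stated in full; the proofs are below) =====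
def Claim_equal_get_unparsable_arguments : Prop := ∀ (remaining_action_arguments : List (List String)), Dom_get_unparsable_arguments remaining_action_arguments → Spec_get_unparsable_arguments remaining_action_arguments (get_unparsable_arguments remaining_action_arguments)

-- ===== LEMMAS AND PROOFS =====

-- Membership in the folded intersection = membership in the seed and in every remaining tuple.
theorem mem_foldl_inter (rest : List (List String)) (c : PySem.Set String) (a : String) :
    a ∈ rest.foldl (fun c t => PySem.Set.inter c (PySem.Set.ofList t)) c ↔
      a ∈ c ∧ ∀ t ∈ rest, a ∈ t := by
  induction rest generalizing c with
  | nil => simp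
  | cons t ts ih =>
    simp only [List.foldl_cons, ih, PySem.Set.mem_inter, PySem.Set.mem_ofList, List.mem_cons]
    constructor
    · rintro ⟨⟨h1, h2⟩, h3⟩
      exact ⟨h1, fun u hu => hu.elim (fun e => e ▸ h2) (h3 u)⟩
    · rintro ⟨h1, h2⟩
      exact ⟨⟨h1, h2 t (Or.inl rfl)⟩, fun u hu => h2 u (Or.inr hu)⟩

-- Filtering by a predicate that only holds on members of s ignores everything folded in after s.
theorem filter_foldl_add (ys : List String) (s : PySem.Set String) (p : String → Bool)
    (h : ∀ a, p a = true → a ∈ s) :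
    (ys.foldl PySem.Set.add s).filter p = s.filter p := by
  induction ys generalizing s with
  | nil => rfl
  | cons y ys ih =>
    simp only [List.foldl_cons]
    by_cases hy : y ∈ s
    · rw [show PySem.Set.add s y = s by simp [PySem.Set.add, hy]]
      exact ih s h
    · have hadd : PySem.Set.add s y = s ++ [y] := by simp [PySem.Set.add, hy]
      rw [hadd, ih (s ++ [y]) (fun a ha => List.mem_append_left _ (h a ha)),
          List.filter_append]
      have hpy : p y = false := by
        cases hp : p y with
        | false => rfl
        | true => exact absurd (h y hp) hy
      simp [hpy]

-- ===== VERDICT (by name: the statement is the Claim_ definition above) =====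
theorem get_unparsable_arguments_spec : Claim_equal_get_unparsable_arguments := by
  intro tss _
  show get_unparsable_arguments tss = get_unparsable_arguments_alt tss
  match tss with
  | [] => rfl
  | first :: rest =>
    simp only [get_unparsable_arguments, get_unparsable_arguments_alt, if_neg (List.cons_ne_nil first rest)]
    have hflat : (first :: rest).flatten = first ++ rest.flatten := rfl
    have hded : PySem.List.dedup (first ++ rest.flatten)
        = rest.flatten.foldl PySem.Set.add (PySem.Set.ofList first) := by
      rw [PySem.List.dedup_eq_ofList, PySem.Set.ofList_eq_foldl, List.foldl_append,
          ← PySem.Set.ofList_eq_foldl]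
    rw [hflat, hded,
        filter_foldl_add _ _ _ (fun a ha => by
          have := List.all_eq_true.mp ha first (List.mem_cons_self ..)
          exact (PySem.Set.mem_ofList ..).mpr (List.contains_iff_mem.mp this))]
    rw [PySem.List.dedup_eq_ofList]
    apply List.filter_congr
    intro a hmem
    have ha1 : a ∈ first := (PySem.Set.mem_ofList ..).mp hmem
    by_cases hall : ∀ t ∈ rest, a ∈ t
    · have hc : PySem.Set.contains (rest.foldl (fun c t => PySem.Set.inter c (PySem.Set.ofList t)) (PySem.Set.ofList first)) a = true :=
        (PySem.Set.contains_iff ..).mpr ((mem_foldl_inter rest _ a).mpr ⟨hmem, hall⟩)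
      rw [hc]
      simp only [List.all_eq_true]
      intro t ht
      rcases List.mem_cons.mp ht with rfl | ht'
      · exact List.contains_iff_mem.mpr ha1
      · exact List.contains_iff_mem.mpr (hall t ht')
    · have hc : PySem.Set.contains (rest.foldl (fun c t => PySem.Set.inter c (PySem.Set.ofList t)) (PySem.Set.ofList first)) a = false := by
        rw [Bool.eq_false_iff]
        intro hcc
        exact hall ((mem_foldl_inter rest _ a).mp ((PySem.Set.contains_iff ..).mp hcc)).2
      rw [hc]
      rw [Bool.eq_false_iff]
      intro hcc
      rcases List.all_eq_true.mp hcc with h'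
      exact hall (fun t ht => List.contains_iff_mem.mp (h' t (List.mem_cons_of_mem _ ht)))
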